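-- pv_equiv track=rewrite | github.com/J0seCamp0s/CFG-Syntax-Checker | main.py | format_string2
-- ===== SOURCE A (Python) =====
-- def format_string2(inpt_str):
--     formatted_string = ""
--     space_ignore = False
--     for ch in inpt_str:
--         if ch == '>':
--             space_ignore = True
--         if space_ignore:
--             if ch == ' ' or ch == '\n' or ch == '\t':
--                 continue
--             if ch == '<':
--                 space_ignore = False
--         formatted_string += ch
--     return(formatted_string)
-- ===== SOURCE B (Python) =====
-- import re
--
-- def format_string2(inpt_str):
--     return re.sub(
--         r'>[^<]*',
--         lambda m: m.group(0).replace(' ', '').replace('\n', '').replace('\t', ''),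
--         inpt_str)
-- ===== Notes on version B (the rewrite author's own statement) =====
-- stated objective: idiomatic
-- what changed: Replaces the char-by-char loop with a stateful flag by a single regex substitution that matches each whole tag-interior region at once and removes space, newline and tab from it via a callback, leaving all other text untouched.
import Mathlib
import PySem

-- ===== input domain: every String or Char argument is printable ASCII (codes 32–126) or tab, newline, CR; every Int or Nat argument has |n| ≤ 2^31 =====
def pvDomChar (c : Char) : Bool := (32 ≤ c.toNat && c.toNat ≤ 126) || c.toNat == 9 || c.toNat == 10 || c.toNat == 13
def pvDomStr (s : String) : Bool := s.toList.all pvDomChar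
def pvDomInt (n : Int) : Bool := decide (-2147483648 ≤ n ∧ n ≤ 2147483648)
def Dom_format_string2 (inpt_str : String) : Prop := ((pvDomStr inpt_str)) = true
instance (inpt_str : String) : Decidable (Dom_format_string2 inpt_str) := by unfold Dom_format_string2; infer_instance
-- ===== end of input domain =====

-- B replaces A's char-by-char flag loop by one regex substitution over each '>'…'<' region;
-- objective: idiomatic. Both are proved to agree on every string.

-- ===== PORT A =====
-- one loop step of A: state = (accumulated characters, space_ignore flag)
def fs2Step (st : List Char × Bool) (ch : Char) : List Char × Bool :=
  let flag := if ch = '>' then true else st.2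
  if flag then
    if ch = ' ' ∨ ch = '\n' ∨ ch = '\t' then (st.1, flag)
    else if ch = '<' then (st.1 ++ [ch], false)
    else (st.1 ++ [ch], flag)
  else (st.1 ++ [ch], flag)

def format_string2 (inpt_str : String) : String :=
  String.mk ((inpt_str.toList.foldl fs2Step ([], false)).1)

-- ===== PORT B =====
-- Source B uses re.sub(r'>[^<]*', strip-whitespace-callback, s).  The regex engine is ported by
-- hand, exactly: copy characters until a '>' starts a match; the match is the '>' plus the
-- longest '<'-free run after it; the callback deletes ' ', '\n', '\t' from the match.
def fs2NotWs (c : Char) : Bool := ¬ (c = ' ' ∨ c = '\n' ∨ c = '\t')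

def fs2Go : List Char → List Char
  | [] => []
  | c :: rest =>
    if c = '>' then
      c :: (rest.takeWhile (· ≠ '<')).filter fs2NotWs ++ fs2Go (rest.dropWhile (· ≠ '<'))
    else c :: fs2Go rest
termination_by l => l.length
decreasing_by
  · exact Nat.lt_succ_of_le (List.length_dropWhile_le _ _)
  · simp

def format_string2_alt (inpt_str : String) : String :=
  String.mk (fs2Go inpt_str.toList)

-- ===== PRECONDITION & SPEC =====
def Spec_format_string2 (inpt_str : String) (out : String) : Prop := out = format_string2_alt inpt_str
instance (inpt_str : String) (out : String) : Decidable (Spec_format_string2 inpt_str out) := by unfold Spec_format_string2; infer_instance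

-- ===== CLAIM (what is proved, stated in full; the proofs are below) =====
def Claim_equal_format_string2 : Prop := ∀ (inpt_str : String), Dom_format_string2 inpt_str → Spec_format_string2 inpt_str (format_string2 inpt_str)

-- ===== LEMMAS AND PROOFS =====

-- the result of B's regex engine from inside a match (after the opening '>')
def fs2GoIn (l : List Char) : List Char :=
  (l.takeWhile (· ≠ '<')).filter fs2NotWs ++ fs2Go (l.dropWhile (· ≠ '<'))

theorem fs2_main (l : List Char) : ∀ acc : List Char,
    (l.foldl fs2Step (acc, false)).1 = acc ++ fs2Go l ∧
    (l.foldl fs2Step (acc, true)).1 = acc ++ fs2GoIn l := by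
  induction l with
  | nil => intro acc; simp [fs2Go, fs2GoIn]
  | cons c rest ih =>
    intro acc
    constructor
    · by_cases hgt : c = '>'
      · subst hgt
        have hstep : fs2Step (acc, false) '>' = (acc ++ ['>'], true) := by simp [fs2Step]
        rw [List.foldl_cons, hstep, (ih (acc ++ ['>'])).2]
        simp [fs2Go, fs2GoIn]
      · have hstep : fs2Step (acc, false) c = (acc ++ [c], false) := by simp [fs2Step, hgt]
        rw [List.foldl_cons, hstep, (ih (acc ++ [c])).1]
        simp [fs2Go, if_neg hgt]
    · by_cases hws : c = ' ' ∨ c = '\n' ∨ c = '\t'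
      · have hlt : c ≠ '<' := by rcases hws with h|h|h <;> subst h <;> decide
        have hgt : c ≠ '>' := by rcases hws with h|h|h <;> subst h <;> decide
        have hstep : fs2Step (acc, true) c = (acc, true) := by simp [fs2Step, hws, hgt]
        rw [List.foldl_cons, hstep, (ih acc).2]
        simp [fs2GoIn, hlt, fs2NotWs, hws]
      · by_cases hlt : c = '<'
        · subst hlt
          have hstep : fs2Step (acc, true) '<' = (acc ++ ['<'], false) := by simp [fs2Step]
          rw [List.foldl_cons, hstep, (ih (acc ++ ['<'])).1]
          simp [fs2GoIn, fs2Go]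
        · have hstep : fs2Step (acc, true) c = (acc ++ [c], true) := by
            simp [fs2Step, hws, hlt]
          rw [List.foldl_cons, hstep, (ih (acc ++ [c])).2]
          have hnw : fs2NotWs c = true := by simp [fs2NotWs, hws]
          simp [fs2GoIn, hlt, hnw]

-- ===== VERDICT (by name: the statement is the Claim_ definition above) =====
theorem format_string2_spec : Claim_equal_format_string2 := by
  intro s _
  unfold Spec_format_string2 format_string2 format_string2_alt
  rw [(fs2_main s.toList []).1]
  simp
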